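-- pv_equiv track=rewrite | github.com/stellarbg/Algorithm | 프로그래머스/1/135808. 과일 장수/과일 장수.py | solution
-- ===== SOURCE A (Python) =====
-- def solution(k, m, score):
--     answer = 0
--
--     score.sort(reverse=True)
--
--     cnt = len(score) // m
--
--     box = [[] for _ in range(cnt + 1)]
--     index = 0
--
--     for i in score:
--         if len(box[index]) == m and index < cnt:
--             index += 1
--         box[index].append(i)
--     for i in range(len(box)):
--         if len(box[i]) == m:
--             answer += min(box[i]) * m
--
--     return answer
-- ===== SOURCE B (Python) =====
-- def solution(k, m, score):
--     # Sort in place (same observable mutation as A), then read the minimum of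
--     # each full box directly: in descending order the minimum of box i is the
--     # element at index i*m + m - 1. No list-of-lists is built.
--     score.sort(reverse=True)
--     cnt = len(score) // m
--     answer = 0
--     for i in range(cnt):
--         answer += score[i * m + m - 1] * m
--     return answer
-- ===== Notes on version B (the rewrite author's own statement) =====
-- stated objective: simpler
-- what changed: Instead of distributing the sorted scores into an explicit list-of-boxes and then rescanning every box with min(), B indexes the descending-sorted list directly: the minimum of the i-th full box is the element at i*m+m-1, so a single arithmetic loop accumulates the answer and no intermediate data structure exists.
import Mathlib
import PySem

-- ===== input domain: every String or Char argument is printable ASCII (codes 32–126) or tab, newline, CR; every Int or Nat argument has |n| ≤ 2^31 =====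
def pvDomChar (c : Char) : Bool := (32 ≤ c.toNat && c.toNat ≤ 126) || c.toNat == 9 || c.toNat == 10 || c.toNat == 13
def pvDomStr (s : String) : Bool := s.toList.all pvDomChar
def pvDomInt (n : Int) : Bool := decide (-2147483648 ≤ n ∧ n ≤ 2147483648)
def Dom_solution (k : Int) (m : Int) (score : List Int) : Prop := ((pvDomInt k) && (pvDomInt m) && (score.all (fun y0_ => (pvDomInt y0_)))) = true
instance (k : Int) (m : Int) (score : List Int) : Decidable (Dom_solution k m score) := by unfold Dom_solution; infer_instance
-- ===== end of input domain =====

-- B replaces A's explicit list-of-boxes (fill boxes, then rescan each with min) by direct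
-- indexing into the descending-sorted list (the minimum of full box i is element i*m+m-1);
-- objective: simpler. Both A and B sort the Python argument list in place; the equivalence
-- proved here is about the return value.


-- ===== PORT A =====
-- the loop body of A's first for-loop ('if len(box[index]) == m and index < cnt: index += 1; box[index].append(i)');
-- pyGetD's default [] is unreachable under Pre_solution (index always in range there)
def stepA (m : Int) (cnt : Int) (st : List (List Int) × Int) (i : Int) : List (List Int) × Int :=
  let index := if ((PySem.List.pyGetD st.1 st.2 ([] : List Int)).length : Int) = m ∧ st.2 < cnt
               then st.2 + 1 else st.2
  (PySem.List.pySetD st.1 index ((PySem.List.pyGetD st.1 index ([] : List Int)) ++ [i]), index)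

def solution (k : Int) (m : Int) (score : List Int) : Int :=
  let score := PySem.List.sorted score (fun x => x) true
  let cnt := PySem.Int.floordiv (score.length : Int) m
  let box : List (List Int) := (PySem.List.pyRange 0 (cnt + 1) 1).map (fun _ => ([] : List Int))
  let fin := score.foldl (stepA m cnt) (box, 0)
  -- 'min(box[i])' : min?'s getD 0 default is unreachable under Pre_solution (the guard forces a nonempty box there)
  (PySem.List.pyRange 0 (fin.1.length : Int) 1).foldl
    (fun answer i =>
      let bi := PySem.List.pyGetD fin.1 i ([] : List Int)
      if (bi.length : Int) = m then answer + ((PySem.List.min? bi (fun x => x)).getD 0) * m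
      else answer) 0

-- ===== PORT B =====
def solution_alt (k : Int) (m : Int) (score : List Int) : Int :=
  let score := PySem.List.sorted score (fun x => x) true
  let cnt := PySem.Int.floordiv (score.length : Int) m
  (PySem.List.pyRange 0 cnt 1).foldl
    (fun answer i => answer + (PySem.List.pyGetD score (i * m + m - 1) 0) * m) 0

-- ===== PRECONDITION & SPEC =====
-- Pre_ excludes exactly the inputs where the Python A raises: m = 0 (ZeroDivisionError at len(score)//m)
-- and m < 0 with nonempty score (cnt < 0, so box is empty and box[0] raises IndexError).
def Pre_solution (k : Int) (m : Int) (score : List Int) : Prop :=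
  1 ≤ m ∨ (m ≤ -1 ∧ score = [])
instance (k : Int) (m : Int) (score : List Int) : Decidable (Pre_solution k m score) := by
  unfold Pre_solution; infer_instance
def pvWitness_solution : Int × Int × List Int := (0, 2, [3, 1, 2, 4, 5])

def Spec_solution (k : Int) (m : Int) (score : List Int) (out : Int) : Prop := out = solution_alt k m score
instance (k : Int) (m : Int) (score : List Int) (out : Int) : Decidable (Spec_solution k m score out) := by unfold Spec_solution; infer_instance

-- ===== CLAIM (what is proved, stated in full; the proofs are below) =====
def Claim_equal_solution : Prop := ∀ (k : Int) (m : Int) (score : List Int), Dom_solution k m score → Pre_solution k m score → Spec_solution k m score (solution k m score)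

-- ===== LEMMAS AND PROOFS =====

-- min(b) as A computes it
def minD (b : List Int) : Int := (PySem.List.min? b (fun x => x)).getD 0

-- the contribution of one box in A's second loop
def contrib (m : Int) (b : List Int) : Int := if (b.length : Int) = m then minD b * m else 0

-- sum of min*m over the full m-chunks of l (reference value both programs are reduced to)
def chunkSum (m : Int) (l : List Int) : Int :=
  if h : 0 < m.toNat ∧ m.toNat ≤ l.length then
    minD (l.take m.toNat) * m + chunkSum m (l.drop m.toNat)
  else 0
termination_by l.length
decreasing_by simp; omega

lemma chunkSum_nil (m : Int) : chunkSum m [] = 0 := by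
  rw [chunkSum]; simp

lemma foldl_contrib (m : Int) :
    ∀ (bs : List (List Int)) (a : Int),
      bs.foldl (fun answer bi => if (bi.length : Int) = m then answer + minD bi * m else answer) a
        = a + (bs.map (contrib m)).sum := by
  intro bs
  induction bs with
  | nil => intro a; simp
  | cons b t ih =>
      intro a
      simp only [List.foldl_cons, List.map_cons, List.sum_cons, ih, contrib]
      split_ifs <;> ring

lemma set_append_len {α : Type} (P : List α) (q : α) (R : List α) (v : α) :
    (P ++ q :: R).set P.length v = P ++ v :: R := by
  induction P with
  | nil => simp
  | cons p t ih => simp [ih]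

lemma getD_append_len (P : List (List Int)) (q : List Int) (R : List (List Int)) :
    PySem.List.pyGetD (P ++ q :: R) (P.length : Int) ([] : List Int) = q := by
  simp [PySem.List.pyGetD_natCast]

-- the invariant of A's first loop: the boxes are D (finished, each of length m.toNat),
-- the current box c, and r still-empty boxes; the fold distributes l into them chunkwise
lemma foldA_inv (m : Int) (hm : 1 ≤ m) (cnt : Nat) :
    ∀ (l : List Int) (D : List (List Int)) (c : List Int) (r : Nat),
      D.length + r = cnt →
      (∀ d ∈ D, d.length = m.toNat) →
      c.length ≤ m.toNat →
      c.length + l.length ≤ r * m.toNat + (m.toNat - 1) →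
      (((l.foldl (stepA m (cnt : Int)) (D ++ c :: List.replicate r [], (D.length : Int))).1.map
          (contrib m)).sum)
        = ((D.map (fun d => minD d * m)).sum + chunkSum m (c ++ l)) := by
  intro l
  have hM : 1 ≤ m.toNat := by omega
  have hmc : ((m.toNat : Nat) : Int) = m := by omega
  induction l with
  | nil =>
      intro D c r h0 h1 h2 hcap
      have hc0 : contrib m ([] : List Int) = 0 := by
        simp only [contrib]; rw [if_neg (by simpa using (by omega : (0:Int) ≠ m))]
      have hD : D.map (contrib m) = D.map (fun d => minD d * m) := by
        refine List.map_congr_left (fun d hd => ?_)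
        simp only [contrib, h1 d hd, hmc]
        exact if_pos trivial
      simp only [List.foldl_nil, List.map_append, List.sum_append, List.map_cons,
        List.sum_cons, List.append_nil, hD, List.map_replicate, hc0]
      simp only [List.sum_replicate, smul_zero]
      by_cases hcm : c.length = m.toNat
      · have : contrib m c = minD c * m := by
          simp only [contrib, hcm, hmc]
          exact if_pos trivial
        rw [this, chunkSum, dif_pos ⟨by omega, le_of_eq hcm.symm⟩]
        rw [← hcm, List.take_length, List.drop_length, chunkSum_nil]
      · have h1' : contrib m c = 0 := by
          simp only [contrib]
          rw [if_neg (by rw [← hmc]; exact_mod_cast fun h => hcm (by exact_mod_cast h))]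
        rw [h1', chunkSum, dif_neg (by omega)]
        ring
  | cons x t ih =>
      intro D c r h0 h1 h2 hcap
      rw [List.foldl_cons]
      by_cases hcm : c.length = m.toNat
      · -- full current box: index advances, x starts a new box
        have hr : 0 < r := by
          rcases Nat.eq_zero_or_pos r with h | h
          · subst h; simp at hcap; omega
          · exact h
        obtain ⟨r', rfl⟩ : ∃ r', r = r' + 1 := ⟨r - 1, by omega⟩
        have hcond : ((PySem.List.pyGetD (D ++ c :: List.replicate (r' + 1) []) ((D.length : Nat) : Int)
            ([] : List Int)).length : Int) = m ∧ ((D.length : Nat) : Int) < (cnt : Int) := by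
          rw [getD_append_len]
          exact ⟨by rw [hcm, hmc], by exact_mod_cast Nat.lt_of_lt_of_le (by omega) (le_of_eq h0)⟩
        have hbox : D ++ c :: List.replicate (r' + 1) ([] : List Int)
            = (D ++ [c]) ++ ([] : List Int) :: List.replicate r' [] := by
          simp [List.replicate_succ]
        have hidx : (D.length : Int) + 1 = (((D ++ [c]).length : Nat) : Int) := by
          simp
        have hstep : stepA m (cnt : Int) (D ++ c :: List.replicate (r' + 1) [], (D.length : Int)) x
            = ((D ++ [c]) ++ [x] :: List.replicate r' [], (((D ++ [c]).length : Nat) : Int)) := by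
          simp only [stepA]
          rw [if_pos hcond, hidx, hbox, getD_append_len, PySem.List.pySetD_natCast, set_append_len]
          simp
        rw [hstep]
        have hmul : (r' + 1) * m.toNat = r' * m.toNat + m.toNat := by ring
        rw [ih (D ++ [c]) [x] r' (by simpa using (by omega : D.length + 1 + r' = cnt))
          (by intro d hd; rcases List.mem_append.1 hd with h | h
              · exact h1 d h
              · simpa using (List.mem_singleton.1 h ▸ hcm))
          (by simpa using hM)
          (by simp at hcap ⊢; omega)]
        have hchunk : chunkSum m (c ++ x :: t) = minD c * m + chunkSum m (x :: t) := by
          rw [chunkSum, dif_pos ⟨by omega, by simp [hcm]⟩]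
          rw [List.take_left' hcm, List.drop_left' hcm]
        simp only [List.map_append, List.sum_append, hchunk]
        simp
        ring
      · -- current box not full: x is appended to it
        have hlt : c.length < m.toNat := lt_of_le_of_ne h2 hcm
        have hcond : ¬ (((PySem.List.pyGetD (D ++ c :: List.replicate r []) ((D.length : Nat) : Int)
            ([] : List Int)).length : Int) = m ∧ ((D.length : Nat) : Int) < (cnt : Int)) := by
          rw [getD_append_len]
          rintro ⟨h, -⟩
          exact hcm (by omega)
        have hstep : stepA m (cnt : Int) (D ++ c :: List.replicate r [], (D.length : Int)) x
            = (D ++ (c ++ [x]) :: List.replicate r [], ((D.length : Nat) : Int)) := by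
          simp only [stepA]
          rw [if_neg hcond, getD_append_len, PySem.List.pySetD_natCast, set_append_len]
        rw [hstep]
        rw [ih D (c ++ [x]) r h0 h1 (by simp; omega) (by simp at hcap ⊢; omega)]
        simp

-- B's loop as a sum over List.range
lemma altSum (m : Int) (s : List Int) (cnt : Int) :
    (PySem.List.pyRange 0 cnt 1).foldl
        (fun answer i => answer + (PySem.List.pyGetD s (i * m + m - 1) 0) * m) 0
      = ((List.range cnt.toNat).map
          (fun (k : Nat) => (PySem.List.pyGetD s ((k : Int) * m + m - 1) 0) * m)).sum := by
  rw [PySem.List.foldl_add, PySem.List.pyRange_one, List.map_map]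
  simp only [Function.comp_def, zero_add, sub_zero]

-- in a descending list the last element is a lower bound
lemma last_le : ∀ (l : List Int) (h : l ≠ []), l.Pairwise (fun a b => b ≤ a) →
    ∀ y ∈ l, l.getLast h ≤ y := by
  intro l
  induction l with
  | nil => simp
  | cons a t ih =>
      intro h hp y hy
      cases t with
      | nil => simp at hy; simp [hy]
      | cons b t' =>
          rw [List.getLast_cons (by simp)]
          rcases List.mem_cons.1 hy with rfl | hy'
          · exact (List.pairwise_cons.1 hp).1 _ (List.getLast_mem (by simp))
          · exact ih (by simp) (List.pairwise_cons.1 hp).2 y hy'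

-- on a descending chunk the minimum is the last element
lemma minD_desc (l : List Int) (hl : l ≠ []) (hp : l.Pairwise (fun a b => b ≤ a)) :
    minD l = l.getLast hl := by
  obtain ⟨m0, hm0⟩ : ∃ m0, PySem.List.min? l (fun x => x) = some m0 := by
    cases hmin : PySem.List.min? l (fun x => x) with
    | none => exact absurd ((PySem.List.min?_eq_none_iff l (fun x => x)).1 hmin) hl
    | some v => exact ⟨v, rfl⟩
  have h1 : m0 ≤ l.getLast hl := PySem.List.min?_isMin hm0 _ (List.getLast_mem hl)
  have h2 : l.getLast hl ≤ m0 := last_le l hl hp m0 (PySem.List.min?_mem hm0)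
  simp [minD, hm0]
  omega

-- B's indexed sum equals chunkSum on any descending list
lemma alt_eq_chunkSum (m : Int) (hm : 1 ≤ m) :
    ∀ (cnt : Nat) (l : List Int), cnt = l.length / m.toNat →
      l.Pairwise (fun a b => b ≤ a) →
      ((List.range cnt).map
          (fun (k : Nat) => (PySem.List.pyGetD l ((k : Int) * m + m - 1) 0) * m)).sum
        = chunkSum m l := by
  obtain ⟨M, rfl⟩ : ∃ M : Nat, m = (M : Int) := ⟨m.toNat, by omega⟩
  have hM : 1 ≤ M := by omega
  intro cnt
  induction cnt with
  | zero =>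
      intro l hc hp
      have hlen : l.length < M := by
        rcases Nat.lt_or_ge l.length M with h | h
        · exact h
        · exact absurd (Nat.div_pos h (by omega)) (by simp [Int.toNat_natCast] at hc; omega)
      rw [chunkSum, dif_neg (by simp [Int.toNat_natCast]; omega)]
      simp
  | succ n ihn =>
      intro l hc hp
      simp only [Int.toNat_natCast] at hc ⊢
      have hle : M ≤ l.length := by
        by_contra h
        rw [Nat.div_eq_of_lt (by omega)] at hc
        omega
      have htlen : (l.take M).length = M := by
        rw [List.length_take]; omega
      have htne : l.take M ≠ [] := by
        intro h; rw [h] at htlen; simp at htlen; omega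
      -- head term: l[M-1] is the minimum of the first chunk
      have hhead : PySem.List.pyGetD l ((0 : Int) * (M : Int) + M - 1) 0 = minD (l.take M) := by
        have hidx : (0 : Int) * (M : Int) + M - 1 = ((M - 1 : Nat) : Int) := by omega
        rw [hidx, PySem.List.pyGetD_natCast,
          List.getD_eq_getElem l 0 (by omega : M - 1 < l.length)]
        rw [minD_desc _ htne (hp.sublist (List.take_sublist _ _))]
        rw [List.getLast_eq_getElem]
        rw [List.getElem_take]
        congr 1
        rw [htlen]
      -- tail terms: shift the index by one chunk
      have htail : ∀ k : Nat,
          PySem.List.pyGetD l (((k + 1 : Nat) : Int) * M + M - 1) 0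
            = PySem.List.pyGetD (l.drop M) ((k : Int) * M + M - 1) 0 := by
        intro k
        have e1 : ((M + (k * M + M - 1) : Nat) : Int) = ((M : Int) + (↑(k * M) + ↑M - 1)) := by
          omega
        have e2 : ((k * M + M - 1 : Nat) : Int) = (↑(k * M) + ↑M - 1) := by omega
        have e3 : ((k * M : Nat) : Int) = (k : Int) * (M : Int) := by push_cast; ring
        have h1 : ((k + 1 : Nat) : Int) * M + M - 1 = ((M + (k * M + M - 1) : Nat) : Int) := by
          rw [e1, e3]; push_cast; ring
        have h2 : ((k : Nat) : Int) * M + M - 1 = ((k * M + M - 1 : Nat) : Int) := by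
          rw [e2, e3]
        rw [h1, h2, PySem.List.pyGetD_natCast, PySem.List.pyGetD_natCast]
        rw [List.getD_eq_getElem?_getD, List.getD_eq_getElem?_getD, List.getElem?_drop]
      rw [List.range_succ_eq_map]
      simp only [List.map_cons, List.sum_cons, List.map_map, Function.comp_def,
        Nat.cast_zero, Nat.succ_eq_add_one]
      have hrec : ((List.range n).map
            (fun k => PySem.List.pyGetD l (((k + 1 : Nat) : Int) * M + M - 1) 0 * M)).sum
          = chunkSum (M : Int) (l.drop M) := by
        have hd := ihn (l.drop M)
          (by simp only [Int.toNat_natCast, List.length_drop]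
              have := Nat.div_eq_sub_div (by omega : 0 < M) hle
              omega)
          (hp.sublist (List.drop_sublist _ _))
        rw [← hd]
        congr 1
        refine List.map_congr_left (fun k _ => ?_)
        rw [htail k]
      rw [chunkSum, dif_pos ⟨by simpa using hM, by simpa using hle⟩, Int.toNat_natCast,
        ← hrec, hhead]

-- ===== VERDICT (by name: the statement is the Claim_ definition above) =====
theorem solution_spec : Claim_equal_solution := by
  intro k m score _ hpre
  unfold Spec_solution
  rcases hpre with hm | ⟨hm, rfl⟩
  · -- main case: 1 ≤ m
    simp only [solution, solution_alt]
    have hmc : ((m.toNat : Nat) : Int) = m := by omega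
    set s := PySem.List.sorted score (fun x => x) true with hs
    have hflo : PySem.Int.floordiv (s.length : Int) m
        = ((s.length / m.toNat : Nat) : Int) := by
      rw [← hmc]
      exact_mod_cast PySem.Int.floordiv_natCast s.length m.toNat
    rw [hflo]
    obtain ⟨cnt, hcnt⟩ : ∃ c : Nat, c = s.length / m.toNat := ⟨_, rfl⟩
    rw [← hcnt]
    have hbox : (PySem.List.pyRange 0 (((cnt : Nat) : Int) + 1) 1).map (fun _ => ([] : List Int))
        = List.replicate (cnt + 1) ([] : List Int) := by
      rw [List.map_const', PySem.List.length_pyRange_one]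
      have he : ((((cnt : Nat) : Int)) + 1 - 0).toNat = cnt + 1 := by omega
      rw [he]
    rw [hbox]
    -- A's first loop via the invariant
    have hcap : (0 : Nat) + s.length ≤ cnt * m.toNat + (m.toNat - 1) := by
      have h1 := Nat.div_add_mod s.length m.toNat
      have h2 := Nat.mod_lt s.length (y := m.toNat) (by omega)
      rw [← hcnt] at h1
      have h3 : m.toNat * cnt = cnt * m.toNat := Nat.mul_comm _ _
      omega
    have hfold := foldA_inv m hm cnt s [] [] cnt (by simp) (by simp) (by simp) (by simpa using hcap)
    simp only [List.nil_append, List.length_nil, Nat.cast_zero, List.map_nil,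
      List.sum_nil, zero_add] at hfold
    rw [List.replicate_succ]
    set fin := s.foldl (stepA m ((cnt : Nat) : Int)) (([] : List Int) :: List.replicate cnt [], (0 : Int)) with hfin
    -- A's second loop
    rw [PySem.List.foldl_pyRange_zero_pyGetD' fin.1 ([] : List Int)
      (fun answer bi => if (bi.length : Int) = m
        then answer + ((PySem.List.min? bi (fun x => x)).getD 0) * m else answer) 0]
    have hconv := foldl_contrib m fin.1 0
    simp only [minD] at hconv
    rw [hconv]
    -- B's loop
    rw [altSum m s ((cnt : Nat) : Int)]
    have hpair : s.Pairwise (fun a b => b ≤ a) := by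
      have := PySem.List.sorted_pairwise_rev score (fun x => x)
      simpa [← hs] using this
    have hB := alt_eq_chunkSum m hm cnt s hcnt hpair
    simp only [Int.toNat_natCast]
    rw [hB, hfold]
    simp
  · -- degenerate case: m ≤ -1, score = []
    have hs0 : PySem.List.sorted ([] : List Int) (fun x => x) true = [] := by
      simp [PySem.List.sorted]
    have hflo0 : PySem.Int.floordiv 0 m = 0 := by
      simp [PySem.Int.floordiv]
    have hr01 : PySem.List.pyRange 0 1 1 = [0] := by decide
    have hr00 : PySem.List.pyRange 0 0 1 = [] := by decide
    have hg : PySem.List.pyGetD [([] : List Int)] 0 ([] : List Int) = [] := by decide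
    simp only [solution, solution_alt, hs0, List.length_nil, Nat.cast_zero, hflo0,
      zero_add, hr01, hr00, List.length_cons, Nat.cast_one, List.map_cons, List.map_nil,
      List.foldl_nil, List.foldl_cons, hg]
    rw [if_neg (by intro h; omega)]
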